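-- pv_equiv track=rewrite | github.com/vanos03/hackathon_kaspersky_2016 | task2/base7/task3/base13/summer13.py | dec_to_base
-- ===== SOURCE A (Python) =====
-- def dec_to_base(number, base):
--     decimal_number = 0
--     power = 0
--
--     for digit in reversed(str(number)):
--         if digit.isdigit():
--             digit_value = int(digit)
--         else:
--             digit_value = ord(digit) - ord('A') + 10
--
--         decimal_number += digit_value * (base ** power)
--         power += 1
--
--     return decimal_number
-- ===== SOURCE B (Python) =====
-- def dec_to_base(number, base):
--     # Horner's method: one multiplication per digit, left to right.
--     result = 0
--     for digit in str(number):
--         if digit.isdigit():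
--             v = int(digit)
--         else:
--             v = ord(digit) - ord('A') + 10
--         result = result * base + v
--     return result
-- ===== Notes on version B (the rewrite author's own statement) =====
-- stated objective: faster
-- what changed: Replaces the right-to-left loop that recomputes base**power for each digit with Horner's method scanning left-to-right with result = result*base + digit.
import Mathlib
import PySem

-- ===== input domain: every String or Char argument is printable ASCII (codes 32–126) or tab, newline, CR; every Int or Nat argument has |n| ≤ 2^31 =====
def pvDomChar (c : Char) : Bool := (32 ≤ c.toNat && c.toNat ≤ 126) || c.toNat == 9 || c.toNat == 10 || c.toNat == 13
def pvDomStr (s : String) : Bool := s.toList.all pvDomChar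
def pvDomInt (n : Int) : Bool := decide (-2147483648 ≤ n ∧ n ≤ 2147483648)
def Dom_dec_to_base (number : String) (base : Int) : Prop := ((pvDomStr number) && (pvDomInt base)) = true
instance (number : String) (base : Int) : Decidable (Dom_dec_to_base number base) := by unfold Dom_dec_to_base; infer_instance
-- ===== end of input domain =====

-- B replaces A's right-to-left scan with base**power per digit by Horner's method (one multiplication per digit); return value proved equal.

-- shared digit decoding: int(c) if c.isdigit() else ord(c) - ord('A') + 10
def pvDigitVal (c : Char) : Int :=
  if c.isDigit then (c.toNat : Int) - 48 else (c.toNat : Int) - 65 + 10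

-- ===== PORT A =====
def dec_to_base (number : String) (base : Int) : Int :=
  (number.toList.reverse.foldl
    (fun (st : Int × Nat) digit => (st.1 + pvDigitVal digit * base ^ st.2, st.2 + 1))
    (0, 0)).1

-- ===== PORT B =====
def dec_to_base_alt (number : String) (base : Int) : Int :=
  number.toList.foldl (fun result digit => result * base + pvDigitVal digit) 0

-- ===== PRECONDITION & SPEC =====
def Spec_dec_to_base (number : String) (base : Int) (out : Int) : Prop := out = dec_to_base_alt number base
instance (number : String) (base : Int) (out : Int) : Decidable (Spec_dec_to_base number base out) := by unfold Spec_dec_to_base; infer_instance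

-- ===== CLAIM (what is proved, stated in full; the proofs are below) =====
def Claim_equal_dec_to_base : Prop := ∀ (number : String) (base : Int), Dom_dec_to_base number base → Spec_dec_to_base number base (dec_to_base number base)

-- ===== LEMMAS AND PROOFS =====

-- Horner fold with starting accumulator a shifts by a * base^length.
theorem pv_horner_shift (base : Int) (l : List Char) :
    ∀ a : Int, l.foldl (fun result digit => result * base + pvDigitVal digit) a
      = a * base ^ l.length + l.foldl (fun result digit => result * base + pvDigitVal digit) 0 := by
  induction l with
  | nil => intro a; simp
  | cons c cs ih =>
    intro a
    simp only [List.foldl, List.length_cons]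
    rw [ih (a * base + pvDigitVal c), ih (0 * base + pvDigitVal c)]
    ring

-- A's foldr form computes (Horner value, length).
theorem pv_foldr_eq (base : Int) (l : List Char) :
    l.foldr (fun digit (st : Int × Nat) => (st.1 + pvDigitVal digit * base ^ st.2, st.2 + 1)) (0, 0)
      = (l.foldl (fun result digit => result * base + pvDigitVal digit) 0, l.length) := by
  induction l with
  | nil => rfl
  | cons c cs ih =>
    simp only [List.foldr, ih, List.length_cons, List.foldl]
    rw [pv_horner_shift base cs (0 * base + pvDigitVal c)]
    rw [Prod.mk.injEq]
    exact ⟨by ring, rfl⟩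

-- ===== VERDICT (by name: the statement is the Claim_ definition above) =====
theorem dec_to_base_spec : Claim_equal_dec_to_base := by
  intro number base _
  unfold Spec_dec_to_base dec_to_base dec_to_base_alt
  rw [List.foldl_reverse]
  have := pv_foldr_eq base number.toList
  simp only [this]
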